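-- pv_equiv track=rewrite | github.com/RealToddler/terminale-nsi | sujet bac 2022/sujet 25.py | trouver_intrus
-- ===== SOURCE A (Python) =====
-- def trouver_intrus(tab, g, d):
--     '''
--     Renvoie la valeur de l'intrus situé entre les indices g et d
--     dans la liste tab où
--     tab vérifie les conditions de l'exercice,
--         g et d sont des multiples de 3.
--     '''
--     if g == d:
--         return tab[g]
--
--     else:
--         nombre_de_triplets = (d - g) // 3
--         indice = g + 3 * (nombre_de_triplets // 2)
--         if tab[indice + 1] == tab[indice]:
--             return trouver_intrus(tab, indice + 3, d)
--         else:
--             return trouver_intrus(tab, g, indice)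
-- ===== SOURCE B (Python) =====
-- def trouver_intrus(tab, g, d):
--     n = (d - g) // 3
--     while n:
--         m = n // 2
--         i = g + 3 * m
--         if tab[i] == tab[i + 1]:
--             g = i + 3
--             n = n - m - 1
--         else:
--             n = m
--     return tab[g]
-- ===== Notes on version B (the rewrite author's own statement) =====
-- stated objective: alternative
-- what changed: Replaced the recursion on the index window (g, d) by an iterative binary search over the COUNT of remaining triplets n = (d-g)//3, maintained as a loop variable (n -> n-m-1 or m), with a single lookup tab[g] after the loop.
-- outside the precondition, e.g. on trouver_intrus([1, 1, 1, 2, 3], 0, 4): A returns 2, B returns 2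
import Mathlib
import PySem

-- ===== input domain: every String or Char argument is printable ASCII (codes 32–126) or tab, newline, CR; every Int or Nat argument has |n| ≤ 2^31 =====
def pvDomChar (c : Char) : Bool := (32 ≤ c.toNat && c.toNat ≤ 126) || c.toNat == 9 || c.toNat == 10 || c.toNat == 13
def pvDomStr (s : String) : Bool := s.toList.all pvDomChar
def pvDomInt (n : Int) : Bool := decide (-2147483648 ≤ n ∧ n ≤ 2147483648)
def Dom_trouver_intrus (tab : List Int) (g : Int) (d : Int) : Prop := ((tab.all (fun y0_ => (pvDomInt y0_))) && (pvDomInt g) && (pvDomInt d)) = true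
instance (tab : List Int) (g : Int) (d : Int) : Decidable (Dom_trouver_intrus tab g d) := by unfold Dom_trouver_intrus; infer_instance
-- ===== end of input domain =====

-- B replaces A's recursion on the index window (g, d) by an iterative binary search over the
-- COUNT of remaining triplets n = (d-g)//3 (alternative decomposition, same asymptotics);
-- equivalence of RETURN values.

-- ===== PORT A =====
-- Python A recurses on (g, d); the fuel argument only makes the recursion total in Lean.
-- Whenever the Python returns, the window d - g is nonnegative and shrinks at every call, so the
-- fuel (d - g).toNat + 1 chosen by the wrapper is never exhausted on such inputs; the fuel-0
-- guard value tab[g] is unreachable there.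
def trouver_intrus_go (tab : List Int) (fuel : Nat) (g d : Int) : Int :=
  match fuel with
  | 0 => (PySem.List.pyGet? tab g).getD 0
  | fuel + 1 =>
    if g = d then (PySem.List.pyGet? tab g).getD 0
    else
      let nombre_de_triplets := PySem.Int.floordiv (d - g) 3
      let indice := g + 3 * PySem.Int.floordiv nombre_de_triplets 2
      if (PySem.List.pyGet? tab (indice + 1)).getD 0 = (PySem.List.pyGet? tab indice).getD 0 then
        trouver_intrus_go tab fuel (indice + 3) d
      else
        trouver_intrus_go tab fuel g indice

def trouver_intrus (tab : List Int) (g : Int) (d : Int) : Int :=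
  trouver_intrus_go tab ((d - g).toNat + 1) g d

-- ===== PORT B =====
-- B's while-loop: the state is (g, n) where n counts the triplets still in play; each step
-- discards either the m = n//2 triplets left of the probe or the m+1 first ones.  The loop
-- returns the final left index g; the single element lookup happens after it.  Fuel only makes
-- the loop total in Lean (Python B loops forever exactly where n stays nonzero, e.g. n < 0).
def trouver_intrus_alt_loop (tab : List Int) (fuel : Nat) (g n : Int) : Int :=
  match fuel with
  | 0 => g
  | fuel + 1 =>
    if n = 0 then g
    else
      let m := PySem.Int.floordiv n 2
      let i := g + 3 * m
      if (PySem.List.pyGet? tab i).getD 0 = (PySem.List.pyGet? tab (i + 1)).getD 0 then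
        trouver_intrus_alt_loop tab fuel (i + 3) (n - m - 1)
      else
        trouver_intrus_alt_loop tab fuel g m

def trouver_intrus_alt (tab : List Int) (g : Int) (d : Int) : Int :=
  let n := PySem.Int.floordiv (d - g) 3
  (PySem.List.pyGet? tab (trouver_intrus_alt_loop tab (n.toNat + 1) g n)).getD 0

-- ===== PRECONDITION & SPEC =====
-- Pre_ is the function's documented domain: a window of whole triplets at valid (possibly
-- negative, Python-style) indices; there A always returns.  A also happens to return on SOME
-- misaligned windows when the data steers the search to a base case — termination there depends
-- on the element values, not on any closed-form input shape, so such inputs stay outside Pre_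
-- (B returns the same value on every one of them; see the cite).  The second disjunct is the one
-- such case that IS closed-form: a window of length 1 or 2 whose first two elements differ, where
-- A immediately narrows to d = g and returns tab[g].
def Pre_trouver_intrus (tab : List Int) (g : Int) (d : Int) : Prop :=
  (g ≤ d ∧ -(tab.length : Int) ≤ g ∧ d < (tab.length : Int) ∧ 3 ∣ (d - g)) ∨
  (g < d ∧ d - g ≤ 2 ∧ -(tab.length : Int) ≤ g ∧ g + 1 < (tab.length : Int) ∧
    (PySem.List.pyGet? tab (g + 1)).getD 0 ≠ (PySem.List.pyGet? tab g).getD 0)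
instance (tab : List Int) (g : Int) (d : Int) : Decidable (Pre_trouver_intrus tab g d) := by
  unfold Pre_trouver_intrus; infer_instance

def pvWitness_trouver_intrus : List Int × Int × Int := ([1, 1, 1, 5], 0, 3)

def Spec_trouver_intrus (tab : List Int) (g : Int) (d : Int) (out : Int) : Prop := out = trouver_intrus_alt tab g d
instance (tab : List Int) (g : Int) (d : Int) (out : Int) : Decidable (Spec_trouver_intrus tab g d out) := by unfold Spec_trouver_intrus; infer_instance

-- ===== CLAIM (what is proved, stated in full; the proofs are below) =====
def Claim_equal_trouver_intrus : Prop := ∀ (tab : List Int) (g : Int) (d : Int), Dom_trouver_intrus tab g d → Pre_trouver_intrus tab g d → Spec_trouver_intrus tab g d (trouver_intrus tab g d)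

-- ===== LEMMAS AND PROOFS =====

-- On an aligned window d = g + 3k, A's recursion and B's count-based loop agree, for any fuels
-- exceeding k (both wrappers supply such fuel there).
lemma go_eq_loop (tab : List Int) : ∀ (k : Nat), ∀ (g d : Int) (fa fb : Nat),
    d - g = 3 * (k : Int) → k < fa → k < fb →
    trouver_intrus_go tab fa g d
      = (PySem.List.pyGet? tab (trouver_intrus_alt_loop tab fb g (k : Int))).getD 0 := by
  intro k
  induction k using Nat.strong_induction_on with
  | _ k ih =>
    intro g d fa fb hwin hfa hfb
    obtain ⟨fa, rfl⟩ : ∃ fa', fa = fa' + 1 := ⟨fa - 1, by omega⟩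
    obtain ⟨fb, rfl⟩ : ∃ fb', fb = fb' + 1 := ⟨fb - 1, by omega⟩
    rcases Nat.eq_zero_or_pos k with hk | hk
    · subst hk
      have hgd : g = d := by omega
      simp [trouver_intrus_go, trouver_intrus_alt_loop, hgd]
    · have hne : ¬ g = d := by omega
      have hnz : ((k : Int)) ≠ 0 := by exact_mod_cast hk.ne'
      have hdivk : PySem.Int.floordiv (d - g) 3 = (k : Int) := by
        rw [hwin]; rw [PySem.Int.floordiv_eq_ediv_of_pos (by omega)]; omega
      have hm : PySem.Int.floordiv (k : Int) 2 = ((k / 2 : Nat) : Int) := by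
        exact_mod_cast PySem.Int.floordiv_natCast k 2
      set m : Nat := k / 2 with hmdef
      have hcond :
          ((PySem.List.pyGet? tab (g + 3 * ((m : Nat) : Int) + 1)).getD 0
            = (PySem.List.pyGet? tab (g + 3 * ((m : Nat) : Int))).getD 0)
          ↔ ((PySem.List.pyGet? tab (g + 3 * ((m : Nat) : Int))).getD 0
            = (PySem.List.pyGet? tab (g + 3 * ((m : Nat) : Int) + 1)).getD 0) := eq_comm
      simp only [trouver_intrus_go, trouver_intrus_alt_loop, if_neg hne, if_neg hnz,
        hdivk, hm]
      by_cases hc : (PySem.List.pyGet? tab (g + 3 * ((m : Nat) : Int))).getD 0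
          = (PySem.List.pyGet? tab (g + 3 * ((m : Nat) : Int) + 1)).getD 0
      · rw [if_pos (hcond.mpr hc), if_pos hc]
        have hk' : k - m - 1 < k := by omega
        have : (k : Int) - (m : Int) - 1 = ((k - m - 1 : Nat) : Int) := by
          have : m < k := by omega
          omega
        rw [this]
        exact ih (k - m - 1) hk' _ d fa fb (by omega) (by omega) (by omega)
      · rw [if_neg (fun h => hc (hcond.mp h)), if_neg hc]
        exact ih m (by omega) g _ fa fb (by omega) (by omega) (by omega)

-- On the short misaligned windows of Pre_'s second disjunct (length 1 or 2, first two elements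
-- differing) both sides reduce to tab[g].
lemma short_window (tab : List Int) (g d : Int)
    (h1 : g < d) (h2 : d - g ≤ 2)
    (hne : (PySem.List.pyGet? tab (g + 1)).getD 0 ≠ (PySem.List.pyGet? tab g).getD 0) :
    trouver_intrus tab g d = trouver_intrus_alt tab g d := by
  have hne' : ¬ g = d := by omega
  have hd0 : PySem.Int.floordiv (d - g) 3 = 0 := by
    rw [PySem.Int.floordiv_eq_ediv_of_pos (by omega)]; omega
  have h02 : PySem.Int.floordiv (0 : Int) 2 = 0 := by
    rw [PySem.Int.floordiv_eq_ediv_of_pos (by omega)]; rfl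
  obtain ⟨f, hf⟩ : ∃ f, (d - g).toNat = f + 1 := ⟨(d - g).toNat - 1, by omega⟩
  have halt : trouver_intrus_alt tab g d = (PySem.List.pyGet? tab g).getD 0 := by
    unfold trouver_intrus_alt
    rw [hd0]
    rfl
  have ha : trouver_intrus tab g d = (PySem.List.pyGet? tab g).getD 0 := by
    unfold trouver_intrus
    rw [hf]
    simp only [trouver_intrus_go, if_neg hne', hd0, h02, mul_zero, add_zero]
    rw [if_neg hne]
    cases f <;> simp only [trouver_intrus_go, if_true]
  rw [ha, halt]

-- ===== VERDICT (by name: the statement is the Claim_ definition above) =====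
theorem trouver_intrus_spec : Claim_equal_trouver_intrus := by
  intro tab g d _ hpre
  unfold Spec_trouver_intrus
  rcases hpre with ⟨hle, _, _, ⟨k0, hk0⟩⟩ | ⟨h1, h2, _, _, hne⟩
  · have hk0' : 0 ≤ k0 := by omega
    obtain ⟨k, rfl⟩ := Int.eq_ofNat_of_zero_le hk0'
    unfold trouver_intrus trouver_intrus_alt
    have hdiv : PySem.Int.floordiv (d - g) 3 = (k : Int) := by
      rw [hk0, PySem.Int.floordiv_eq_ediv_of_pos (by omega)]; omega
    rw [hdiv]
    exact go_eq_loop tab k g d _ _ hk0 (by omega) (by omega)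
  · exact short_window tab g d h1 h2 hne
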